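-- pv_equiv track=rewrite | github.com/jcolinpatrick/kryptos | scripts/e_explorer_01_sanborn_manuscript.py | keyword_distance
-- ===== SOURCE A (Python) =====
-- from collections import Counter
-- from typing import Dict, List, Optional, Tuple
--
-- def keyword_distance(alphabet: List[int]) -> int:
--     """Measure how 'keyword-like' a partial alphabet mapping is.
--
--     Returns the number of consecutive pairs where the difference is constant
--     (characteristic of keyword alphabets where the non-keyword tail is alphabetical).
--     """
--     diffs = []
--     for i in range(len(alphabet) - 1):
--         if alphabet[i] is not None and alphabet[i+1] is not None:
--             diffs.append((alphabet[i+1] - alphabet[i]) % 26)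
--     if not diffs:
--         return 0
--     # Count most common diff (keyword alphabets have long runs of diff=1)
--     counter = Counter(diffs)
--     return counter.most_common(1)[0][1] if counter else 0
-- ===== SOURCE B (Python) =====
-- def keyword_distance(alphabet):
--     """Measure how 'keyword-like' a partial alphabet mapping is.
--
--     Same result as A: the highest frequency among the (mod-26) differences of
--     adjacent non-None entries, computed by sorting the differences and scanning
--     runs instead of Counter.most_common.
--     """
--     diffs = [(b - a) % 26 for a, b in zip(alphabet, alphabet[1:])
--              if a is not None and b is not None]
--     if not diffs:
--         return 0
--     diffs.sort()
--     best = run = 1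
--     prev = diffs[0]
--     for d in diffs[1:]:
--         if d == prev:
--             run += 1
--         else:
--             run = 1
--             prev = d
--         if run > best:
--             best = run
--     return best
-- ===== Notes on version B (the rewrite author's own statement) =====
-- stated objective: alternative
-- what changed: The adjacent differences are built by zipping the list with its tail instead of an index loop, and the mode's frequency is found by sorting the differences and scanning for the longest run of equal adjacent values instead of Counter(...).most_common(1).
import Mathlib
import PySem

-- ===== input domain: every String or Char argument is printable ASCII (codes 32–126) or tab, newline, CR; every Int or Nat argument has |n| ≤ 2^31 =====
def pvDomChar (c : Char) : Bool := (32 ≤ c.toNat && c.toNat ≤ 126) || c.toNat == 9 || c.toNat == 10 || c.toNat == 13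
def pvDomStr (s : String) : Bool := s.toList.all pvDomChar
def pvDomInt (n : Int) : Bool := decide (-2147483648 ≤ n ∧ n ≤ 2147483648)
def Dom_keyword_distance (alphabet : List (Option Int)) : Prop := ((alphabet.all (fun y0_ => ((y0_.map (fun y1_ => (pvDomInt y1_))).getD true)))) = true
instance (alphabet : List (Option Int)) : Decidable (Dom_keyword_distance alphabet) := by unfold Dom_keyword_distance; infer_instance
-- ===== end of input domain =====

-- B differs from A only in HOW the mode's frequency is computed (sort + run scan
-- instead of Counter.most_common); return values agree on all inputs.

-- ===== PORT A =====
-- for i in range(len(alphabet)-1): if both entries are not None, append (a[i+1]-a[i]) % 26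
def keyword_distance (alphabet : List (Option Int)) : Int :=
  let diffs : List Int :=
    (PySem.List.pyRange 0 ((alphabet.length : Int) - 1) 1).foldl
      (fun acc i =>
        match PySem.List.pyGetD alphabet i none, PySem.List.pyGetD alphabet (i + 1) none with
        | some a, some b => acc ++ [PySem.Int.mod (b - a) 26]
        | _, _ => acc) []
  if diffs = [] then 0
  else
    let counter := PySem.Dict.counter diffs
    if counter.items ≠ [] then
      -- counter.most_common(1)[0][1]: head of items sorted by count, descending
      match PySem.List.sorted counter.items (fun p => p.2) true with
      | (_, c) :: _ => c
      | [] => 0  -- unreachable: counter.items ≠ [] (totality default only)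
    else 0

-- ===== PORT B =====
-- diffs via zip of the list with its tail (the comprehension in Source B)
def kdAltDiffs (alphabet : List (Option Int)) : List Int :=
  (alphabet.zip (alphabet.drop 1)).filterMap (fun p =>
    match p.1 with
    | some a =>
        match p.2 with
        | some b => some (PySem.Int.mod (b - a) 26)
        | none => none
    | none => none)

-- the run-scan loop of Source B: state (best, run, prev)
def kdRunScan : List Int → Int → Int → Int → Int
  | [], best, _, _ => best
  | d :: rest, best, run, prev =>
      let run' := if d = prev then run + 1 else 1
      let prev' := if d = prev then prev else d
      kdRunScan rest (if run' > best then run' else best) run' prev'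

def keyword_distance_alt (alphabet : List (Option Int)) : Int :=
  let diffs := kdAltDiffs alphabet
  match PySem.List.sorted diffs (fun x => x) false with
  | [] => 0
  | d0 :: rest => kdRunScan rest 1 1 d0

-- ===== PRECONDITION & SPEC =====
def Spec_keyword_distance (alphabet : List (Option Int)) (out : Int) : Prop := out = keyword_distance_alt alphabet
instance (alphabet : List (Option Int)) (out : Int) : Decidable (Spec_keyword_distance alphabet out) := by unfold Spec_keyword_distance; infer_instance

-- ===== CLAIM (what is proved, stated in full; the proofs are below) =====
def Claim_equal_keyword_distance : Prop := ∀ (alphabet : List (Option Int)), Dom_keyword_distance alphabet → Spec_keyword_distance alphabet (keyword_distance alphabet)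

-- ===== LEMMAS AND PROOFS =====

-- "out is the maximum multiplicity of an element of l"
def IsMaxCount (l : List Int) (m : Int) : Prop :=
  (∃ k ∈ l, m = (l.count k : Int)) ∧ ∀ k ∈ l, (l.count k : Int) ≤ m

theorem isMaxCount_unique {l : List Int} {m₁ m₂ : Int}
    (h₁ : IsMaxCount l m₁) (h₂ : IsMaxCount l m₂) : m₁ = m₂ := by
  obtain ⟨⟨k₁, hk₁, he₁⟩, hb₁⟩ := h₁
  obtain ⟨⟨k₂, hk₂, he₂⟩, hb₂⟩ := h₂
  have := hb₂ k₁ hk₁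
  have := hb₁ k₂ hk₂
  omega

theorem isMaxCount_perm {l l' : List Int} {m : Int} (hp : l.Perm l')
    (h : IsMaxCount l m) : IsMaxCount l' m := by
  obtain ⟨⟨k, hk, he⟩, hb⟩ := h
  refine ⟨⟨k, hp.mem_iff.mp hk, by rwa [← hp.count_eq]⟩, ?_⟩
  intro k hk'
  rw [← hp.count_eq]
  exact hb k (hp.mem_iff.mpr hk')

-- A's diffs-loop equals B's zip comprehension
theorem kd_diffs_eq_aux (step : Option Int × Option Int → Option Int) :
    ∀ (xs : List (Option Int)),
      (List.range (xs.length - 1)).filterMap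
        (fun k => step (xs.getD k none, xs.getD (k + 1) none))
      = (xs.zip (xs.drop 1)).filterMap step := by
  intro xs
  match xs with
  | [] => simp
  | [x] => simp
  | x :: y :: t =>
      have ih := kd_diffs_eq_aux step (y :: t)
      simp only [List.length_cons, Nat.add_sub_cancel, List.range_succ_eq_map,
        List.filterMap_cons, List.filterMap_map]
      simp only [List.length_cons, Nat.add_sub_cancel] at ih
      have hcomp :
          (fun k => step ((x :: y :: t).getD k none, (x :: y :: t).getD (k + 1) none)) ∘ Nat.succ
          = (fun k => step ((y :: t).getD k none, (y :: t).getD (k + 1) none)) := by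
        funext k; simp [Function.comp, List.getD]
      rw [hcomp, ih]
      cases hstep : step (x, y) <;> simp [List.zip, hstep]

theorem kd_foldl_append_match (f : Int → Option Int) :
    ∀ (l : List Int) (acc : List Int),
      l.foldl (fun acc i => match f i with | some v => acc ++ [v] | none => acc) acc
      = acc ++ l.filterMap f := by
  intro l
  induction l with
  | nil => simp
  | cons x t ih =>
      intro acc
      cases hx : f x <;> simp [List.foldl_cons, hx, ih]

theorem kd_diffs_eq (alphabet : List (Option Int)) :
    (PySem.List.pyRange 0 ((alphabet.length : Int) - 1) 1).foldl
      (fun acc i =>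
        match PySem.List.pyGetD alphabet i none, PySem.List.pyGetD alphabet (i + 1) none with
        | some a, some b => acc ++ [PySem.Int.mod (b - a) 26]
        | _, _ => acc) []
    = kdAltDiffs alphabet := by
  have hbody : (fun (acc : List Int) i =>
      match PySem.List.pyGetD alphabet i none, PySem.List.pyGetD alphabet (i + 1) none with
      | some a, some b => acc ++ [PySem.Int.mod (b - a) 26]
      | _, _ => acc)
      = fun acc i => match (fun j =>
          match PySem.List.pyGetD alphabet j none, PySem.List.pyGetD alphabet (j + 1) none with
          | some a, some b => some (PySem.Int.mod (b - a) 26)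
          | _, _ => none) i with | some v => acc ++ [v] | none => acc := by
    funext acc i
    cases h1 : PySem.List.pyGetD alphabet i none <;>
      cases h2 : PySem.List.pyGetD alphabet (i + 1) none <;> simp [h1, h2]
  rw [hbody, kd_foldl_append_match, List.nil_append]
  rw [PySem.List.pyRange_one, List.filterMap_map]
  have hlen : (((alphabet.length : Int)) - 1 - 0).toNat = alphabet.length - 1 := by omega
  rw [hlen]
  have hfun : ((fun j =>
          match PySem.List.pyGetD alphabet j none, PySem.List.pyGetD alphabet (j + 1) none with
          | some a, some b => some (PySem.Int.mod (b - a) 26)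
          | _, _ => none) ∘ fun k : Nat => (0 : Int) + k)
      = fun k : Nat => (fun p : Option Int × Option Int =>
          match p.1 with
          | some a =>
              match p.2 with
              | some b => some (PySem.Int.mod (b - a) 26)
              | none => none
          | none => none) (alphabet.getD k none, alphabet.getD (k + 1) none) := by
    funext k
    have h1 : ((0 : Int) + (k : Int)) = ((k : Nat) : Int) := by omega
    have h2 : ((k : Int) + 1) = (((k + 1 : Nat)) : Int) := by push_cast; ring
    simp only [Function.comp, h1, h2, PySem.List.pyGetD_natCast]
    cases alphabet.getD k none <;> cases alphabet.getD (k + 1) none <;> rfl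
  rw [hfun]
  unfold kdAltDiffs
  exact kd_diffs_eq_aux (fun p =>
    match p.1 with
    | some a =>
        match p.2 with
        | some b => some (PySem.Int.mod (b - a) 26)
        | none => none
    | none => none) alphabet

-- invariant of the run scan over a sorted list
theorem kd_count_snoc (l : List Int) (a b : Int) :
    (l ++ [b]).count a = l.count a + (if a = b then 1 else 0) := by
  by_cases h : a = b
  · simp [List.count_append, h]
  · simp [List.count_append, h, (Ne.symm h : b ≠ a)]

theorem kdRunScan_spec :
    ∀ (rest consumed : List Int) (best run prev : Int),
      (consumed ++ rest).Pairwise (· ≤ ·) →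
      prev ∈ consumed →
      (∀ k ∈ consumed, k ≤ prev) →
      run = (consumed.count prev : Int) →
      (∃ k ∈ consumed, best = (consumed.count k : Int)) →
      (∀ k ∈ consumed, (consumed.count k : Int) ≤ best) →
      IsMaxCount (consumed ++ rest) (kdRunScan rest best run prev) := by
  intro rest
  induction rest with
  | nil =>
      intro consumed best run prev _ _ _ _ hatt hbd
      simp only [kdRunScan, List.append_nil]
      exact ⟨hatt, hbd⟩
  | cons d rest ih =>
      intro consumed best run prev hpw hprevmem hprevmax hrun hatt hbd
      have hle_d : ∀ x ∈ consumed, x ≤ d := fun x hx =>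
        (List.pairwise_append.mp hpw).2.2 x hx d List.mem_cons_self
      have hpw' : ((consumed ++ [d]) ++ rest).Pairwise (· ≤ ·) := by
        simpa [List.append_assoc] using hpw
      rw [show consumed ++ d :: rest = (consumed ++ [d]) ++ rest by simp]
      by_cases hd : d = prev
      · -- d continues the current run
        subst hd
        rw [show kdRunScan (d :: rest) best run d
            = kdRunScan rest (if run + 1 > best then run + 1 else best) (run + 1) d by
          simp [kdRunScan]]
        apply ih (consumed ++ [d]) _ _ d hpw'
        · exact List.mem_append_right _ (by simp)
        · intro k hk
          rcases List.mem_append.mp hk with h | h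
          · exact hprevmax k h
          · have : k = d := by simpa using h
            omega
        · rw [kd_count_snoc, if_pos rfl]
          push_cast
          omega
        · by_cases hgt : run + 1 > best
          · refine ⟨d, List.mem_append_right _ (by simp), ?_⟩
            rw [if_pos hgt, kd_count_snoc, if_pos rfl]
            push_cast
            omega
          · obtain ⟨k₀, hk₀, hbe⟩ := hatt
            have hk₀d : k₀ ≠ d := by
              intro h
              subst h
              omega
            refine ⟨k₀, List.mem_append_left _ hk₀, ?_⟩
            rw [if_neg hgt, kd_count_snoc, if_neg hk₀d]
            push_cast
            omega
        · intro k hk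
          rcases List.mem_append.mp hk with h | h
          · have := hbd k h
            by_cases hkd : k = d
            · subst hkd
              rw [kd_count_snoc, if_pos rfl]
              push_cast
              split <;> omega
            · rw [kd_count_snoc, if_neg hkd]
              push_cast
              split <;> omega
          · have hkd : k = d := by simpa using h
            subst hkd
            rw [kd_count_snoc, if_pos rfl]
            push_cast
            split <;> omega
      · -- d starts a new run of length 1
        have hlt : prev < d := lt_of_le_of_ne (hle_d prev hprevmem) (fun h => hd h.symm)
        have hdnot : d ∉ consumed := fun h => absurd (hprevmax d h) (by omega)
        have hcnt0 : consumed.count d = 0 := List.count_eq_zero.mpr hdnot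
        have hbest1 : 1 ≤ best := by
          obtain ⟨k₀, hk₀, hbe⟩ := hatt
          have : 0 < consumed.count k₀ := List.count_pos_iff.mpr hk₀
          omega
        rw [show kdRunScan (d :: rest) best run prev = kdRunScan rest best 1 d by
          simp [kdRunScan, hd, if_neg (by omega : ¬ best < (1 : Int))]]
        apply ih (consumed ++ [d]) best 1 d hpw'
        · exact List.mem_append_right _ (by simp)
        · intro k hk
          rcases List.mem_append.mp hk with h | h
          · exact le_of_lt (lt_of_le_of_lt (hprevmax k h) hlt)
          · have : k = d := by simpa using h
            omega
        · rw [kd_count_snoc, if_pos rfl]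
          push_cast
          omega
        · obtain ⟨k₀, hk₀, hbe⟩ := hatt
          have hk₀d : k₀ ≠ d := fun h => hdnot (h ▸ hk₀)
          refine ⟨k₀, List.mem_append_left _ hk₀, ?_⟩
          rw [kd_count_snoc, if_neg hk₀d]
          push_cast
          omega
        · intro k hk
          rcases List.mem_append.mp hk with h | h
          · have hkd : k ≠ d := fun he => hdnot (he ▸ h)
            have := hbd k h
            rw [kd_count_snoc, if_neg hkd]
            push_cast
            omega
          · have hkd : k = d := by simpa using h
            subst hkd
            rw [kd_count_snoc, if_pos rfl]
            push_cast
            omega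

-- ===== VERDICT (by name: the statement is the Claim_ definition above) =====
theorem kd_alt_isMaxCount (alphabet : List (Option Int))
    (d0 : Int) (rB : List Int)
    (hsB : PySem.List.sorted (kdAltDiffs alphabet) (fun x => x) false = d0 :: rB) :
    IsMaxCount (kdAltDiffs alphabet) (kdRunScan rB 1 1 d0) := by
  have hperm : ([d0] ++ rB).Perm (kdAltDiffs alphabet) := by
    simpa [hsB] using PySem.List.sorted_perm (kdAltDiffs alphabet) (fun x => x) false
  apply isMaxCount_perm hperm
  apply kdRunScan_spec rB [d0] 1 1 d0
  · have := PySem.List.sorted_pairwise (kdAltDiffs alphabet) (fun x => x)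
    rw [hsB] at this
    simpa using this
  · simp
  · intro k hk
    simp at hk
    omega
  · simp
  · exact ⟨d0, by simp, by simp⟩
  · intro k hk
    simp at hk
    subst hk
    simp

theorem keyword_distance_spec : Claim_equal_keyword_distance := by
  intro alphabet _
  show keyword_distance alphabet = keyword_distance_alt alphabet
  have hA0 : keyword_distance alphabet =
      (if kdAltDiffs alphabet = [] then 0
       else
         if (PySem.Dict.counter (kdAltDiffs alphabet)).items ≠ [] then
           match PySem.List.sorted (PySem.Dict.counter (kdAltDiffs alphabet)).items
               (fun p => p.2) true with
           | (_, c) :: _ => c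
           | [] => 0
         else 0) := by
    unfold keyword_distance
    rw [kd_diffs_eq]
  have halt : keyword_distance_alt alphabet =
      (match PySem.List.sorted (kdAltDiffs alphabet) (fun x => x) false with
       | [] => (0 : Int)
       | d0 :: rest => kdRunScan rest 1 1 d0) := rfl
  by_cases hnil : kdAltDiffs alphabet = []
  · rw [hA0, if_pos hnil, halt]
    rw [show PySem.List.sorted (kdAltDiffs alphabet) (fun x => x) false = [] by
      rw [PySem.List.sorted_eq_nil_iff]
      exact hnil]
  · -- nonempty diffs: both sides are the maximum multiplicity
    obtain ⟨x, hx⟩ := List.exists_mem_of_ne_nil _ hnil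
    have hitems : (PySem.Dict.counter (kdAltDiffs alphabet)).items
        = (PySem.Set.ofList (kdAltDiffs alphabet)).map
            (fun k => (k, ((kdAltDiffs alphabet).count k : Int))) :=
      PySem.Dict.items_counter _
    have hxset : x ∈ PySem.Set.ofList (kdAltDiffs alphabet) :=
      (PySem.Set.mem_ofList _ _).mpr hx
    have hitems_ne : (PySem.Dict.counter (kdAltDiffs alphabet)).items ≠ [] := by
      rw [hitems]
      intro h
      rw [List.map_eq_nil_iff] at h
      rw [h] at hxset
      exact absurd hxset (List.not_mem_nil)
    have hsne : PySem.List.sorted (PySem.Dict.counter (kdAltDiffs alphabet)).items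
        (fun p => p.2) true ≠ [] := by
      rw [Ne, PySem.List.sorted_eq_nil_iff]
      exact hitems_ne
    cases hsort : PySem.List.sorted (PySem.Dict.counter (kdAltDiffs alphabet)).items
        (fun p => p.2) true with
    | nil => exact absurd hsort hsne
    | cons p t =>
        obtain ⟨k0, c⟩ := p
        -- A returns c, and c is the maximum multiplicity
        have hmemS : (k0, c) ∈ (PySem.Dict.counter (kdAltDiffs alphabet)).items := by
          have : (k0, c) ∈ PySem.List.sorted
              (PySem.Dict.counter (kdAltDiffs alphabet)).items (fun p => p.2) true := by
            rw [hsort]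
            exact List.mem_cons_self
          rwa [PySem.List.mem_sorted] at this
        have hAmax : IsMaxCount (kdAltDiffs alphabet) c := by
          constructor
          · rw [hitems] at hmemS
            obtain ⟨k, hkmem, hkeq⟩ := List.mem_map.mp hmemS
            injection hkeq with h1 h2
            subst h1
            exact ⟨k, (PySem.Set.mem_ofList _ _).mp hkmem, h2.symm⟩
          · intro k hk
            have hkitems : (k, ((kdAltDiffs alphabet).count k : Int))
                ∈ (PySem.Dict.counter (kdAltDiffs alphabet)).items := by
              rw [hitems]
              exact List.mem_map.mpr ⟨k, (PySem.Set.mem_ofList _ _).mpr hk, rfl⟩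
            exact PySem.List.key_head_sorted_rev_ge _ _ hsort _ hkitems
        -- B returns the maximum multiplicity too
        cases hsB : PySem.List.sorted (kdAltDiffs alphabet) (fun x => x) false with
        | nil =>
            rw [PySem.List.sorted_eq_nil_iff] at hsB
            exact absurd hsB hnil
        | cons d0 rB =>
            have hBmax := kd_alt_isMaxCount alphabet d0 rB hsB
            have hBval : keyword_distance_alt alphabet = kdRunScan rB 1 1 d0 := by
              rw [halt, hsB]
            rw [hA0, if_neg hnil, if_pos hitems_ne, hsort, hBval]
            exact isMaxCount_unique hAmax hBmax
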